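-- pv_equiv track=rewrite | github.com/matrimonysanskaar/Astrologymatch | services/numerology_service.py | calculate_name_number
-- ===== SOURCE A (Python) =====
-- NUMEROLOGY_CHART = {
--     'a': 1, 'b': 2, 'c': 3, 'd': 4, 'e': 5, 'f': 6, 'g': 7, 'h': 8,
--     'i': 9, 'j': 1, 'k': 2, 'l': 3, 'm': 4, 'n': 5, 'o': 6, 'p': 7,
--     'q': 8, 'r': 9, 's': 1, 't': 2, 'u': 3, 'v': 4, 'w': 5, 'x': 6,
--     'y': 7, 'z': 8
-- }
--
-- MASTER_NUMBERS = {11, 22, 33}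
--
-- def reduce_to_single_digit(number: int, include_master: bool = True) -> int:
--     """
--     Reduce a number to a single digit using the Pythagorean method.
--     Master numbers (11, 22, 33) are preserved if include_master is True.
--     """
--     if number <= 0:
--         return 0
--
--     # If it's a master number and we want to keep it
--     if include_master and number in MASTER_NUMBERS:
--         return number
--
--     while number > 9 and number not in MASTER_NUMBERS:
--         number = sum(int(digit) for digit in str(number))
--
--     return number
--
-- def calculate_name_number(name: str) -> int:
--     """
--     Calculate the Destiny Number from a name using Pythagorean system.
--     """
--     if not name:
--         return 0
--
--     name = name.lower().replace(" ", "").replace("-", "")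
--     total = 0
--
--     for char in name:
--         if char in NUMEROLOGY_CHART:
--             total += NUMEROLOGY_CHART[char]
--
--     return reduce_to_single_digit(total)
-- ===== SOURCE B (Python) =====
-- def _reduce(number):
--     if number <= 0:
--         return 0
--     if number <= 9 or number in (11, 22, 33):
--         return number
--     return _reduce(sum(int(d) for d in str(number)))
--
-- def calculate_name_number(name: str) -> int:
--     total = sum((ord(c) - 97) % 9 + 1 for c in name.lower() if 97 <= ord(c) <= 122)
--     return _reduce(total)
-- ===== Notes on version B (the rewrite author's own statement) =====
-- stated objective: idiomatic
-- what changed: Replaces the 26-entry dict lookup (after two replace() passes) with the closed-form letter value ((ord(c)-97)%9+1 over a letter filter of the lowercased string, and replaces the while-loop digit reduction with a recursive reduction function.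
import Mathlib
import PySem

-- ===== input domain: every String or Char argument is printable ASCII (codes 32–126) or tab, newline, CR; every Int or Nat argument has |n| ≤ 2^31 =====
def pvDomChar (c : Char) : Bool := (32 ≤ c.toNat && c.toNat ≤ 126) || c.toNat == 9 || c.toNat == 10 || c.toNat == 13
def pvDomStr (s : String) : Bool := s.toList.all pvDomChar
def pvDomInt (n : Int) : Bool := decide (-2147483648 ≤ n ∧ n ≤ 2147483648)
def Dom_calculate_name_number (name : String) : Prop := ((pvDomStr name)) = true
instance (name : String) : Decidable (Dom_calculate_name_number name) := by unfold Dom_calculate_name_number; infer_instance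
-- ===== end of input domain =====

-- B replaces the dict lookup by the closed-form letter value and the while-loop digit
-- reduction by a recursive function; return values are identical on all inputs.

-- ===== PORT A =====

-- NUMEROLOGY_CHART
def pvChart : PySem.Dict Char Int := PySem.Dict.ofList
  [('a', 1), ('b', 2), ('c', 3), ('d', 4), ('e', 5), ('f', 6), ('g', 7), ('h', 8),
   ('i', 9), ('j', 1), ('k', 2), ('l', 3), ('m', 4), ('n', 5), ('o', 6), ('p', 7),
   ('q', 8), ('r', 9), ('s', 1), ('t', 2), ('u', 3), ('v', 4), ('w', 5), ('x', 6),
   ('y', 7), ('z', 8)]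

-- sum(int(digit) for digit in str(number)); the digits of a positive int always parse,
-- so the `.getD 0` default is never used at the call sites (number > 9 there)
def pvDigitSumA (number : Int) : Int :=
  ((PySem.Int.toChars number).map (fun d => (PySem.Int.ofChars? [d]).getD 0)).sum

-- the `while number > 9 and number not in MASTER_NUMBERS` loop; the fuel only makes the
-- recursion structural (each pass strictly shrinks `number`, so `number.toNat` passes
-- are always enough and the fuel-out branch is never taken at the call site)
def pvLoopA : Nat → Int → Int
  | 0, number => number
  | fuel + 1, number =>
    if 9 < number ∧ ¬(number = 11 ∨ number = 22 ∨ number = 33) then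
      pvLoopA fuel (pvDigitSumA number)
    else number

def reduce_to_single_digit (number : Int) (include_master : Bool) : Int :=
  if number ≤ 0 then 0
  else if include_master ∧ (number = 11 ∨ number = 22 ∨ number = 33) then number
  else pvLoopA number.toNat number

def calculate_name_number (name : String) : Int :=
  if name.toList.isEmpty then 0
  else
    let cs := PySem.Chars.replace (PySem.Chars.replace (PySem.Chars.lower name.toList) [' '] []) ['-'] []
    let total := cs.foldl (fun t c => if (pvChart.get? c).isSome = true then t + pvChart.getD c 0 else t) 0
    reduce_to_single_digit total true

-- ===== PORT B =====

-- sum(int(d) for d in str(number)) in _reduce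
def pvDigitSumB (number : Int) : Int :=
  ((PySem.Int.toChars number).map (fun d => (PySem.Int.ofChars? [d]).getD 0)).sum

-- _reduce; fuel makes the recursion structural (the digit sum of number > 33 is smaller
-- than number, so number.toNat calls always suffice and fuel-out is never reached)
def pvReduceB : Nat → Int → Int
  | 0, number => number
  | fuel + 1, number =>
    if number ≤ 0 then 0
    else if number ≤ 9 ∨ number = 11 ∨ number = 22 ∨ number = 33 then number
    else pvReduceB fuel (pvDigitSumB number)

def calculate_name_number_alt (name : String) : Int :=
  let total := (((PySem.Chars.lower name.toList).filter
      (fun c => 97 ≤ c.toNat ∧ c.toNat ≤ 122)).map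
      (fun c => PySem.Int.mod ((c.toNat : Int) - 97) 9 + 1)).sum
  pvReduceB total.toNat total

-- ===== PRECONDITION & SPEC =====
def Spec_calculate_name_number (name : String) (out : Int) : Prop := out = calculate_name_number_alt name
instance (name : String) (out : Int) : Decidable (Spec_calculate_name_number name out) := by unfold Spec_calculate_name_number; infer_instance

-- ===== CLAIM (what is proved, stated in full; the proofs are below) =====
def Claim_equal_calculate_name_number : Prop := ∀ (name : String), Dom_calculate_name_number name → Spec_calculate_name_number name (calculate_name_number name)

-- ===== LEMMAS AND PROOFS =====

-- every char produced by Nat.toDigitsCore 10 is a digit char with nonnegative parse value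
theorem toDigitsCore_nonneg (f : Nat) : ∀ (n : Nat) (l : List Char),
    (∀ c ∈ l, 0 ≤ ((PySem.Int.ofChars? [c]).getD 0 : Int)) →
    ∀ c ∈ Nat.toDigitsCore 10 f n l, 0 ≤ ((PySem.Int.ofChars? [c]).getD 0 : Int) := by
  induction f with
  | zero => intro n l hl; simpa [Nat.toDigitsCore] using hl
  | succ f ih =>
    intro n l hl
    have hd : 0 ≤ ((PySem.Int.ofChars? [Nat.digitChar (n % 10)]).getD 0 : Int) := by
      have h10 : n % 10 < 10 := Nat.mod_lt _ (by norm_num)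
      generalize n % 10 = d at h10
      interval_cases d <;> decide
    simp only [Nat.toDigitsCore]
    split
    · intro c hc
      rcases List.mem_cons.mp hc with rfl | h
      · exact hd
      · exact hl c h
    · exact ih (n / 10) _ (by
        intro c hc
        rcases List.mem_cons.mp hc with rfl | h
        · exact hd
        · exact hl c h)

theorem digitSumA_nonneg (n : Int) (hn : 0 ≤ n) : 0 ≤ pvDigitSumA n := by
  apply List.sum_nonneg
  intro x hx
  simp only [List.mem_map] at hx
  obtain ⟨c, hc, rfl⟩ := hx
  have : PySem.Int.toChars n = Nat.toDigits 10 n.toNat := by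
    simp [PySem.Int.toChars, not_lt.mpr hn]
  rw [this] at hc
  exact toDigitsCore_nonneg _ _ [] (by simp) c hc

-- the fueled while-loop of A and the fueled recursion of B agree on nonnegative inputs
theorem loop_eq (f : Nat) : ∀ (n : Int), 0 ≤ n → pvLoopA f n = pvReduceB f n := by
  induction f with
  | zero => intro n _; rfl
  | succ f ih =>
    intro n hn
    simp only [pvLoopA, pvReduceB]
    split_ifs with h1 h2 h3 <;>
      first
        | rfl
        | (exact ih _ (digitSumA_nonneg n hn))
        | omega

-- replace(s, o, "") with a single-char pattern is a filter
theorem replace_go_single (o : Char) : ∀ (fuel : Nat) (l acc : List Char), l.length ≤ fuel →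
    PySem.Chars.replace.go [o] [] fuel l acc = acc.reverse ++ l.filter (fun c => c != o) := by
  intro fuel
  induction fuel with
  | zero =>
    intro l acc hl
    have : l = [] := List.eq_nil_of_length_eq_zero (by omega)
    subst this
    simp [PySem.Chars.replace.go]
  | succ f ih =>
    intro l acc hl
    match l with
    | [] => simp [PySem.Chars.replace.go]
    | c :: t =>
      simp only [PySem.Chars.replace.go]
      by_cases hco : (o == c) = true
      · have hc : c = o := (eq_of_beq hco).symm
        rw [if_pos (by simp [List.isPrefixOf, hco])]
        have hd : List.drop [o].length (c :: t) = t := by simp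
        rw [hd]
        simp only [List.reverse_nil, List.nil_append]
        rw [ih t acc (by simpa using hl)]
        simp [hc]
      · have hne : c ≠ o := fun h => by subst h; simp at hco
        rw [if_neg (by simp [List.isPrefixOf, hco])]
        rw [ih t (c :: acc) (by simpa using hl)]
        simp [hne]

theorem replace_single (o : Char) (l : List Char) :
    PySem.Chars.replace l [o] [] = l.filter (fun c => c != o) := by
  simpa using replace_go_single o l.length l [] le_rfl

-- chart lookup of a lowercase letter: present, with the closed-form value
theorem chart_in (c : Char) (h1 : 97 ≤ c.toNat) (h2 : c.toNat ≤ 122) :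
    pvChart.get? c = some (PySem.Int.mod ((c.toNat : Int) - 97) 9 + 1) := by
  obtain ⟨n, hn1, hn2, rfl⟩ : ∃ n, 97 ≤ n ∧ n ≤ 122 ∧ c = Char.ofNat n :=
    ⟨c.toNat, h1, h2, (Char.ofNat_toNat c).symm⟩
  interval_cases n <;> decide

-- chart lookup of anything else: absent
theorem chart_out (c : Char) (h : ¬(97 ≤ c.toNat ∧ c.toNat ≤ 122)) :
    pvChart.get? c = none := by
  suffices hf : List.find? (fun p => p.1 == c) pvChart.items = none by
    simp [PySem.Dict.get?, hf]
  rw [List.find?_eq_none]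
  intro p hp
  have hitems : pvChart.items = [('a', (1:Int)), ('b', 2), ('c', 3), ('d', 4), ('e', 5), ('f', 6), ('g', 7), ('h', 8), ('i', 9), ('j', 1), ('k', 2), ('l', 3), ('m', 4), ('n', 5), ('o', 6), ('p', 7), ('q', 8), ('r', 9), ('s', 1), ('t', 2), ('u', 3), ('v', 4), ('w', 5), ('x', 6), ('y', 7), ('z', 8)] := by decide
  rw [hitems] at hp
  fin_cases hp <;> (simp only [beq_iff_eq]; rintro rfl; exact h (by decide))

-- the two total sums agree, list by list
theorem sums_eq (l : List Char) :
    ((((l.filter (fun c => c != ' ')).filter (fun c => c != '-')).filter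
        (fun c => (pvChart.get? c).isSome)).map (fun c => pvChart.getD c 0)).sum =
    ((l.filter (fun c => 97 ≤ c.toNat ∧ c.toNat ≤ 122)).map
        (fun c => PySem.Int.mod ((c.toNat : Int) - 97) 9 + 1)).sum := by
  induction l with
  | nil => simp
  | cons c t ih =>
    by_cases hr : 97 ≤ c.toNat ∧ c.toNat ≤ 122
    · have hs : c ≠ ' ' := by rintro rfl; exact absurd hr.1 (by decide)
      have hh : c ≠ '-' := by rintro rfl; exact absurd hr.1 (by decide)
      have hin := chart_in c hr.1 hr.2
      have hsome : (pvChart.get? c).isSome = true := by rw [hin]; rfl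
      have hgd : pvChart.getD c 0 = PySem.Int.mod ((c.toNat : Int) - 97) 9 + 1 := by
        simp [PySem.Dict.getD, hin]
      rw [List.filter_cons_of_pos (by simp [hs]), List.filter_cons_of_pos (by simp [hh]),
        List.filter_cons_of_pos (by simp [hsome]), List.filter_cons_of_pos (by simp [hr]),
        List.map_cons, List.map_cons, List.sum_cons, List.sum_cons, hgd, ih]
    · have hnone : pvChart.get? c = none := chart_out c hr
      have hsome : (pvChart.get? c).isSome = false := by rw [hnone]; rfl
      by_cases hsp : c = ' '
      · subst hsp
        rw [List.filter_cons_of_neg (by simp), List.filter_cons_of_neg (by simp)]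
        exact ih
      · by_cases hhy : c = '-'
        · subst hhy
          rw [List.filter_cons_of_pos (by simp), List.filter_cons_of_neg (by simp),
            List.filter_cons_of_neg (by simp)]
          exact ih
        · rw [List.filter_cons_of_pos (by simp [hsp]), List.filter_cons_of_pos (by simp [hhy]),
            List.filter_cons_of_neg (by simp [hsome]), List.filter_cons_of_neg (by simp [hr])]
          exact ih

theorem totalB_nonneg (l : List Char) :
    0 ≤ ((l.filter (fun c => 97 ≤ c.toNat ∧ c.toNat ≤ 122)).map
        (fun c => PySem.Int.mod ((c.toNat : Int) - 97) 9 + 1)).sum := by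
  apply List.sum_nonneg
  intro x hx
  simp only [List.mem_map] at hx
  obtain ⟨c, _, rfl⟩ := hx
  have := PySem.Int.mod_nonneg ((c.toNat : Int) - 97) (b := 9) (by norm_num)
  omega

-- A's reduce_to_single_digit equals B's fueled _reduce on nonnegative totals
theorem reduce_eq (t : Int) (ht : 0 ≤ t) :
    reduce_to_single_digit t true = pvReduceB t.toNat t := by
  unfold reduce_to_single_digit
  split_ifs with h1 h2
  · have : t = 0 := by omega
    subst this; rfl
  · have hf : ∃ f, t.toNat = f + 1 := ⟨t.toNat - 1, by omega⟩
    obtain ⟨f, hfe⟩ := hf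
    rw [hfe]
    simp only [pvReduceB]
    rw [if_neg (by omega), if_pos (by simp at h2; omega)]
  · exact loop_eq t.toNat t ht

-- ===== VERDICT (by name: the statement is the Claim_ definition above) =====
theorem calculate_name_number_spec : Claim_equal_calculate_name_number := by
  intro name _
  simp only [Spec_calculate_name_number, calculate_name_number, calculate_name_number_alt]
  by_cases hemp : name.toList.isEmpty
  · rw [if_pos hemp]
    rw [List.isEmpty_iff] at hemp
    rw [hemp]
    simp [PySem.Chars.lower, pvReduceB]
  · rw [if_neg hemp]
    rw [replace_single, replace_single]
    rw [PySem.List.foldl_if_eq_foldl_filter (fun c => (pvChart.get? c).isSome)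
      (fun t c => t + pvChart.getD c 0)]
    rw [PySem.List.foldl_add]
    rw [zero_add]
    rw [sums_eq]
    exact reduce_eq _ (totalB_nonneg _)
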